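-- pv_equiv track=rewrite | github.com/shadabshaukat/spaces-ai | search-app/app/text_utils.py | _apply_overlap
-- ===== SOURCE A (Python) =====
-- from typing import List, Tuple
--
-- def _apply_overlap(chunks: List[str], overlap: int) -> List[str]:
--     if overlap <= 0 or not chunks:
--         return chunks
--     out: List[str] = []
--     prev_tail = ""
--     for ch in chunks:
--         prefix = prev_tail
--         combined = (prefix + ch) if prefix else ch
--         out.append(combined)
--         prev_tail = ch[-overlap:]
--     return out
-- ===== SOURCE B (Python) =====
-- from typing import List
--
-- def _apply_overlap(chunks: List[str], overlap: int) -> List[str]: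
--     if overlap <= 0 or not chunks:
--         return chunks
--
--     # Divide and conquer on index ranges: each output element depends only on
--     # its predecessor in the ORIGINAL list, so segments can be solved independently.
--     def solve(lo: int, hi: int) -> List[str]:
--         if hi - lo == 1:
--             c = chunks[lo]
--             return [chunks[lo - 1][-overlap:] + c] if lo > 0 else [c]
--         mid = (lo + hi) // 2
--         return solve(lo, mid) + solve(mid, hi)
--
--     return solve(0, len(chunks))
-- ===== Notes on version B (the rewrite author's own statement) =====
-- stated objective: alternative
-- what changed: Replaced the single stateful left-to-right loop carrying prev_tail with a divide-and-conquer recursion on index ranges: each half of the list is solved independently (each output element depends only on its predecessor in the original list) and the halves are concatenated.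
import Mathlib
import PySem

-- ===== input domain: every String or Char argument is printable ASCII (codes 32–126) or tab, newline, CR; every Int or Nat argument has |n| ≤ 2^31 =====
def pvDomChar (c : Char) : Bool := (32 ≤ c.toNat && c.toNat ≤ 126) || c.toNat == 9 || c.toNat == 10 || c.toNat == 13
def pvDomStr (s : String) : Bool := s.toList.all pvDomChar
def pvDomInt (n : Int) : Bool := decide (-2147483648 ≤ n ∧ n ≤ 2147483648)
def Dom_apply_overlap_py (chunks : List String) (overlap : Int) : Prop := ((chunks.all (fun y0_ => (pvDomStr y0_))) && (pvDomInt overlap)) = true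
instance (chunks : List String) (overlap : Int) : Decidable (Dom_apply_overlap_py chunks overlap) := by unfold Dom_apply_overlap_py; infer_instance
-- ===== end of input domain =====

-- B replaces A's stateful left-to-right loop (carried prev_tail) by a divide-and-conquer
-- recursion on index ranges; same result, different decomposition.

-- ===== PORT A =====
-- ch[-overlap:]  (overlap > 0 on every use)
def pvTail (ch : String) (overlap : Int) : String := PySem.Str.slice ch (some (-overlap)) none

def apply_overlap_py (chunks : List String) (overlap : Int) : List String :=
  if overlap ≤ 0 || chunks.isEmpty then chunks
  else
    -- for ch in chunks: prefix = prev_tail; combined = (prefix + ch) if prefix else ch; out.append(combined); prev_tail = ch[-overlap:]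
    (chunks.foldl (fun (st : List String × String) ch =>
        let pfx := st.2
        let combined := if pfx ≠ "" then pfx ++ ch else ch
        (st.1 ++ [combined], pvTail ch overlap)) ([], "")).1

-- ===== PORT B =====
-- solve(lo, hi): transform chunks[lo:hi]; Python indices are in range on every call,
-- so chunks[i] is ported as getD (exact here); the final 'else []' branch is a
-- totality guard only — Python never reaches hi ≤ lo.
def pvSolve (chunks : List String) (overlap : Int) (lo hi : Nat) : List String :=
  if hi - lo = 1 then
    if 0 < lo then [pvTail (chunks.getD (lo - 1) "") overlap ++ chunks.getD lo ""]
    else [chunks.getD lo ""]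
  else if lo < hi then
    pvSolve chunks overlap lo ((lo + hi) / 2) ++ pvSolve chunks overlap ((lo + hi) / 2) hi
  else []
termination_by hi - lo
decreasing_by all_goals omega

def apply_overlap_py_alt (chunks : List String) (overlap : Int) : List String :=
  if overlap ≤ 0 || chunks.isEmpty then chunks
  else pvSolve chunks overlap 0 chunks.length

-- ===== PRECONDITION & SPEC =====
def Spec_apply_overlap_py (chunks : List String) (overlap : Int) (out : List String) : Prop := out = apply_overlap_py_alt chunks overlap
instance (chunks : List String) (overlap : Int) (out : List String) : Decidable (Spec_apply_overlap_py chunks overlap out) := by unfold Spec_apply_overlap_py; infer_instance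

-- ===== CLAIM (what is proved, stated in full; the proofs are below) =====
def Claim_equal_apply_overlap_py : Prop := ∀ (chunks : List String) (overlap : Int), Dom_apply_overlap_py chunks overlap → Spec_apply_overlap_py chunks overlap (apply_overlap_py chunks overlap)

-- ===== LEMMAS AND PROOFS =====

-- pointwise description of output element i (i ≥ 1 gets the predecessor's tail)
def pvElem (chunks : List String) (overlap : Int) (i : Nat) : String :=
  if 0 < i then pvTail (chunks.getD (i - 1) "") overlap ++ chunks.getD i ""
  else chunks.getD i ""

-- first-order sequential form, bridge between the two ports
def pvRec (overlap : Int) (prev : String) : List String → List String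
  | [] => []
  | h :: t => (pvTail prev overlap ++ h) :: pvRec overlap h t

-- A's loop from state (out, pvTail prev) appends the sequential form
theorem pvLoop_eq (overlap : Int) :
    ∀ (l : List String) (out : List String) (prev : String),
      (l.foldl (fun (st : List String × String) ch =>
          let pfx := st.2
          let combined := if pfx ≠ "" then pfx ++ ch else ch
          (st.1 ++ [combined], pvTail ch overlap)) (out, pvTail prev overlap)).1
        = out ++ pvRec overlap prev l := by
  intro l
  induction l with
  | nil => intro out prev; simp [pvRec]
  | cons c l ih =>
      intro out prev
      simp only [List.foldl_cons, pvRec]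
      have hc : (if pvTail prev overlap ≠ "" then pvTail prev overlap ++ c else c)
          = pvTail prev overlap ++ c := by
        by_cases h : pvTail prev overlap = "" <;> simp [h]
      rw [hc, ih]
      simp

-- the sequential form is pointwise pvElem over the index range
theorem pvRec_eq_range (chunks : List String) (overlap : Int) :
    ∀ (l : List String) (lo : Nat), 1 ≤ lo → chunks.drop lo = l →
      pvRec overlap (chunks.getD (lo - 1) "") l
        = (List.range' lo l.length).map (pvElem chunks overlap) := by
  intro l
  induction l with
  | nil => intro lo _ _; simp [pvRec]
  | cons h t ih =>
      intro lo hlo hdrop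
      have hlt : lo < chunks.length := by
        by_contra hge
        rw [List.drop_eq_nil_of_le (by omega)] at hdrop
        simp at hdrop
      have hget : chunks[lo]?.getD "" = h := by
        have h0 : (chunks.drop lo)[0]?.getD "" = h := by rw [hdrop]; rfl
        rwa [List.getElem?_drop, Nat.add_zero] at h0
      have hdrop' : chunks.drop (lo + 1) = t := by
        have h1 := congrArg List.tail hdrop
        rwa [List.tail_drop] at h1
      have ih' := ih (lo + 1) (by omega) hdrop'
      rw [show (h :: t).length = t.length + 1 from rfl, List.range'_succ, List.map_cons]
      simp only [pvRec]
      congr 1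
      · have hpos : 0 < lo := hlo
        simp [pvElem, hpos, List.getD_eq_getElem?_getD, hget]
      · rw [show lo + 1 - 1 = lo from rfl, List.getD_eq_getElem?_getD, hget] at ih'
        exact ih'

-- divide and conquer computes pvElem pointwise on its range
theorem pvSolve_eq_range (chunks : List String) (overlap : Int) :
    ∀ (k lo hi : Nat), hi - lo = k → lo < hi →
      pvSolve chunks overlap lo hi
        = (List.range' lo (hi - lo)).map (pvElem chunks overlap) := by
  intro k
  induction k using Nat.strong_induction_on with
  | _ k ih =>
    intro lo hi hk hlt
    rw [pvSolve]
    by_cases h1 : hi - lo = 1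
    · have : hi = lo + 1 := by omega
      subst this
      simp only [h1, if_true]
      by_cases hlo : 0 < lo <;> simp [hlo, pvElem, List.range']
    · have h2 : 2 ≤ hi - lo := by omega
      set mid := (lo + hi) / 2 with hmid
      have hm1 : lo < mid := by omega
      have hm2 : mid < hi := by omega
      rw [if_neg h1, if_pos hlt]
      rw [ih (mid - lo) (by omega) lo mid rfl hm1,
          ih (hi - mid) (by omega) mid hi rfl hm2]
      rw [← List.map_append]
      congr 1
      have hsum : (mid - lo) + (hi - mid) = hi - lo := by omega
      have hmid' : lo + 1 * (mid - lo) = mid := by omega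
      calc List.range' lo (mid - lo) ++ List.range' mid (hi - mid)
          = List.range' lo (mid - lo) ++ List.range' (lo + 1 * (mid - lo)) (hi - mid) := by
            rw [hmid']
        _ = List.range' lo ((mid - lo) + (hi - mid)) :=
            List.range'_append (s := lo) (m := mid - lo) (n := hi - mid) (step := 1)
        _ = List.range' lo (hi - lo) := by rw [hsum]

-- ===== VERDICT (by name: the statement is the Claim_ definition above) =====
theorem apply_overlap_py_spec : Claim_equal_apply_overlap_py := by
  intro chunks overlap _
  unfold Spec_apply_overlap_py apply_overlap_py apply_overlap_py_alt
  by_cases hg : overlap ≤ 0 || chunks.isEmpty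
  · simp [hg]
  · simp only [hg, if_false, Bool.false_eq_true]
    cases chunks with
    | nil => simp at hg
    | cons c rest =>
      -- A side: first iteration specialised (prefix = ""), then pvLoop_eq
      have hA : (List.foldl (fun (st : List String × String) ch =>
            let pfx := st.2
            let combined := if pfx ≠ "" then pfx ++ ch else ch
            (st.1 ++ [combined], pvTail ch overlap)) ([], "") (c :: rest)).1
          = c :: pvRec overlap c rest := by
        simp only [List.foldl_cons]
        simpa using pvLoop_eq overlap rest [c] c
      rw [hA]
      -- B side
      rw [pvSolve_eq_range (c :: rest) overlap ((c :: rest).length - 0) 0 (c :: rest).length rfl (by simp)]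
      have : List.range' 0 ((c :: rest).length - 0) = 0 :: List.range' 1 rest.length := by
        simp [List.range'_succ]
      rw [this]
      simp only [List.map_cons]
      congr 1
      have := pvRec_eq_range (c :: rest) overlap rest 1 (le_refl 1) (by simp)
      simpa using this
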